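-- pv_equiv track=rewrite | github.com/abhineet123/river_ice_segmentation | plotting/barchart.py | create_z_grid
-- ===== SOURCE A (Python) =====
-- import itertools
--
-- def create_z_grid(len_x_df_uniq, len_y_df_uniq, z_df):
--     z_temp_df = []
--
--     for x, y in itertools.product(range(len_x_df_uniq), range(len_y_df_uniq)):
--         if x == y:
--             z_temp_df.append(z_df[x])
--         else:
--             z_temp_df.append(None)
--     return z_temp_df
-- ===== SOURCE B (Python) =====
-- def create_z_grid(len_x_df_uniq, len_y_df_uniq, z_df):
--     result = [None] * (max(len_x_df_uniq, 0) * max(len_y_df_uniq, 0))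
--     for i in range(min(len_x_df_uniq, len_y_df_uniq)):
--         result[i * len_y_df_uniq + i] = z_df[i]
--     return result
-- ===== Notes on version B (the rewrite author's own statement) =====
-- stated objective: alternative
-- what changed: B preallocates the X*Y flat grid of None and writes only the min(X,Y) diagonal cells at closed-form index i*Y+i, instead of iterating every cell of the full product and branching on x==y.
import Mathlib
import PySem

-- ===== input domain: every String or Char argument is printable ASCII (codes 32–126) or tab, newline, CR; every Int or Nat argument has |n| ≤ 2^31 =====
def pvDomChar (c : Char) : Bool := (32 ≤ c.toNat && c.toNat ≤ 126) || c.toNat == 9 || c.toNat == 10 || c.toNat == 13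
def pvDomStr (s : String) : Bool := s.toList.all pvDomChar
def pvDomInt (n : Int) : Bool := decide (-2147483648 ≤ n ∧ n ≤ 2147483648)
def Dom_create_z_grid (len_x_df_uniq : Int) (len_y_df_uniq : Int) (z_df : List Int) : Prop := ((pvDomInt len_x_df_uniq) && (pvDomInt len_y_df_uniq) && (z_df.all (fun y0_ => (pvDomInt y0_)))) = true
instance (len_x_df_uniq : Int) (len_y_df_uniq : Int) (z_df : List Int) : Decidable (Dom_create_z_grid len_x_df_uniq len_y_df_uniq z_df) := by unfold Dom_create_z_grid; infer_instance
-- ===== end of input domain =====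

-- B preallocates the flat grid of None and writes only the min(X,Y) diagonal cells by
-- closed-form index arithmetic (i*Y+i), instead of A's full double loop with a per-cell branch.


-- ===== PORT A =====
-- for x, y in itertools.product(range(X), range(Y)): append z_df[x] if x == y else None
def create_z_grid (len_x_df_uniq : Int) (len_y_df_uniq : Int) (z_df : List Int) : List (Option Int) :=
  (PySem.List.pyRange 0 len_x_df_uniq 1).foldl
    (fun acc x =>
      (PySem.List.pyRange 0 len_y_df_uniq 1).foldl
        (fun acc2 y => acc2 ++ [if x == y then PySem.List.pyGet? z_df x else none]) acc)
    []

-- ===== PORT B =====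
-- result = [None] * (max(X,0) * max(Y,0)); for i in range(min(X,Y)): result[i*Y+i] = z_df[i]
def create_z_grid_alt (len_x_df_uniq : Int) (len_y_df_uniq : Int) (z_df : List Int) : List (Option Int) :=
  (PySem.List.pyRange 0 (min len_x_df_uniq len_y_df_uniq) 1).foldl
    (fun res i => res.set (i * len_y_df_uniq + i).toNat (PySem.List.pyGet? z_df i))
    (List.replicate (max len_x_df_uniq 0 * max len_y_df_uniq 0).toNat none)

-- ===== PRECONDITION & SPEC =====
-- Pre_ excludes exactly the inputs on which both Pythons raise IndexError at z_df[i]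
-- (a positive diagonal length min(X,Y) exceeding len(z_df)); no returning input is excluded.
def Pre_create_z_grid (len_x_df_uniq : Int) (len_y_df_uniq : Int) (z_df : List Int) : Prop :=
  min len_x_df_uniq len_y_df_uniq ≤ (z_df.length : Int) ∨ min len_x_df_uniq len_y_df_uniq ≤ 0
instance (len_x_df_uniq : Int) (len_y_df_uniq : Int) (z_df : List Int) : Decidable (Pre_create_z_grid len_x_df_uniq len_y_df_uniq z_df) := by unfold Pre_create_z_grid; infer_instance

def pvWitness_create_z_grid : Int × Int × List Int := (2, 3, [5, 7])

def Spec_create_z_grid (len_x_df_uniq : Int) (len_y_df_uniq : Int) (z_df : List Int) (out : List (Option Int)) : Prop := out = create_z_grid_alt len_x_df_uniq len_y_df_uniq z_df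
instance (len_x_df_uniq : Int) (len_y_df_uniq : Int) (z_df : List Int) (out : List (Option Int)) : Decidable (Spec_create_z_grid len_x_df_uniq len_y_df_uniq z_df out) := by unfold Spec_create_z_grid; infer_instance

-- ===== CLAIM (what is proved, stated in full; the proofs are below) =====
def Claim_equal_create_z_grid : Prop := ∀ (len_x_df_uniq : Int) (len_y_df_uniq : Int) (z_df : List Int), Dom_create_z_grid len_x_df_uniq len_y_df_uniq z_df → Pre_create_z_grid len_x_df_uniq len_y_df_uniq z_df → Spec_create_z_grid len_x_df_uniq len_y_df_uniq z_df (create_z_grid len_x_df_uniq len_y_df_uniq z_df)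

-- ===== LEMMAS AND PROOFS =====

-- Nat-indexed form of A: full grid, row x carries z[x]? on the diagonal
def gA (a b : Nat) (z : List Int) : List (Option Int) :=
  (List.range a).flatMap (fun x => (List.range b).map (fun y => if x = y then z[x]? else none))

-- Nat-indexed form of B after m diagonal writes
def gBp (a b : Nat) (z : List Int) (m : Nat) : List (Option Int) :=
  (List.range m).foldl (fun res i => res.set (i * b + i) z[i]?) (List.replicate (a * b) none)

theorem gA_succ (n b : Nat) (z : List Int) :
    gA (n + 1) b z = gA n b z ++ (List.range b).map (fun y => if n = y then z[n]? else none) := by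
  simp [gA, List.range_succ]

theorem gA_length (a b : Nat) (z : List Int) : (gA a b z).length = a * b := by
  induction a with
  | zero => simp [gA]
  | succ n ih => rw [gA_succ]; simp [ih, Nat.succ_mul]

theorem gBp_succ (a b : Nat) (z : List Int) (m : Nat) :
    gBp a b z (m + 1) = (gBp a b z m).set (m * b + m) z[m]? := by
  simp [gBp, List.range_succ]

theorem gBp_length (a b : Nat) (z : List Int) (m : Nat) : (gBp a b z m).length = a * b := by
  induction m with
  | zero => simp [gBp]
  | succ n ih => rw [gBp_succ]; simp [ih]

theorem gA_getElem? (a b : Nat) (z : List Int) (k : Nat) (hk : k < a * b) :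
    (gA a b z)[k]? = some (if k / b = k % b then z[k / b]? else none) := by
  induction a with
  | zero => omega
  | succ n ih =>
    have hb : 0 < b := by
      rcases Nat.eq_zero_or_pos b with h | h
      · subst h; omega
      · exact h
    rw [gA_succ]
    by_cases h : k < n * b
    · rw [List.getElem?_append_left (by rw [gA_length]; exact h)]
      exact ih h
    · have hle : n * b ≤ k := Nat.le_of_not_lt h
      have hr : k - n * b < b := by
        have := hk; rw [Nat.succ_mul] at this; omega
      rw [List.getElem?_append_right (by rw [gA_length]; exact hle), gA_length]
      have hdiv : k / b = n := Nat.div_eq_of_lt_le hle hk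
      have hmod : k % b = k - n * b := by
        have e := Nat.div_add_mod k b
        rw [hdiv] at e
        have : b * n = n * b := Nat.mul_comm b n
        omega
      rw [List.getElem?_map, List.getElem?_range hr, hdiv, hmod]
      rfl

theorem gBp_getElem? (a b : Nat) (z : List Int) (m : Nat) (hm : m ≤ min a b)
    (k : Nat) (hk : k < a * b) :
    (gBp a b z m)[k]? = some (if k % b = k / b ∧ k / b < m then z[k / b]? else none) := by
  induction m with
  | zero => simp [gBp, hk]
  | succ n ih =>
    have hb : 0 < b := by
      rcases Nat.eq_zero_or_pos b with h | h
      · subst h; omega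
      · exact h
    have hna : n < a := by omega
    have hnb : n < b := by omega
    rw [gBp_succ]
    by_cases he : k = n * b + n
    · have hkl : k < (gBp a b z n).length := by rw [gBp_length]; exact hk
      have hdiv : k / b = n := by
        apply Nat.div_eq_of_lt_le
        · omega
        · rw [Nat.succ_mul]; omega
      have hmod : k % b = n := by
        have e := Nat.div_add_mod k b
        rw [hdiv] at e
        have : b * n = n * b := Nat.mul_comm b n
        omega
      rw [he] at hkl ⊢
      rw [List.getElem?_set_self hkl]
      rw [← he, hdiv, hmod]
      simp
    · rw [List.getElem?_set_ne (fun h => he h.symm), ih (by omega)]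
      have hiff : (k % b = k / b ∧ k / b < n + 1) ↔ (k % b = k / b ∧ k / b < n) := by
        constructor
        · rintro ⟨h1, h2⟩
          refine ⟨h1, ?_⟩
          rcases Nat.lt_or_ge (k / b) n with h | h
          · exact h
          · exfalso
            have h3 : k / b = n := by omega
            apply he
            have e := Nat.div_add_mod k b
            rw [h3] at e
            rw [h3] at h1
            have hcomm : b * n = n * b := Nat.mul_comm b n
            omega
        · rintro ⟨h1, h2⟩; exact ⟨h1, by omega⟩
      simp only [hiff]

theorem gA_eq_gBp (a b : Nat) (z : List Int) : gA a b z = gBp a b z (min a b) := by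
  apply List.ext_getElem?
  intro k
  by_cases hk : k < a * b
  · rw [gA_getElem? a b z k hk, gBp_getElem? a b z (min a b) le_rfl k hk]
    have hb : 0 < b := by
      rcases Nat.eq_zero_or_pos b with h | h
      · subst h; omega
      · exact h
    have hda : k / b < a := by
      rw [Nat.div_lt_iff_lt_mul hb]; exact hk
    have hmb : k % b < b := Nat.mod_lt _ hb
    by_cases hc : k / b = k % b
    · rw [if_pos hc, if_pos ⟨hc.symm, by omega⟩]
    · rw [if_neg hc, if_neg (fun h => hc h.1.symm)]
  · rw [List.getElem?_eq_none (by rw [gA_length]; omega),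
        List.getElem?_eq_none (by rw [gBp_length]; omega)]

theorem portA_eq (X Y : Int) (z : List Int) :
    create_z_grid X Y z = gA X.toNat Y.toNat z := by
  unfold create_z_grid gA
  simp only [PySem.List.foldl_append_singleton_eq_map, PySem.List.foldl_append_eq_flatMap,
    List.nil_append, PySem.List.pyRange_one, Int.sub_zero, List.flatMap_map, List.map_map]
  simp [Function.comp_def, PySem.List.pyGet?_natCast]

theorem foldl_mem_congr {α β : Type} (l : List β) (f g : α → β → α) (init : α)
    (h : ∀ acc x, x ∈ l → f acc x = g acc x) : l.foldl f init = l.foldl g init := by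
  induction l generalizing init with
  | nil => rfl
  | cons x xs ih =>
    simp only [List.foldl_cons]
    rw [h init x List.mem_cons_self]
    exact ih _ (fun acc y hy => h acc y (List.mem_cons_of_mem _ hy))

theorem portB_eq (X Y : Int) (z : List Int) :
    create_z_grid_alt X Y z = gBp X.toNat Y.toNat z (min X.toNat Y.toNat) := by
  unfold create_z_grid_alt gBp
  have h1 : (max X 0 * max Y 0).toNat = X.toNat * Y.toNat := by
    rw [show max X 0 = (X.toNat : Int) by omega, show max Y 0 = (Y.toNat : Int) by omega,
      ← Nat.cast_mul, Int.toNat_natCast]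
  have h2 : (min X Y).toNat = min X.toNat Y.toNat := by omega
  rw [PySem.List.pyRange_one, Int.sub_zero, h1, h2, List.foldl_map]
  by_cases hmin : min X.toNat Y.toNat = 0
  · rw [hmin]; rfl
  · have hY : Y = (Y.toNat : Int) := by omega
    apply foldl_mem_congr
    intro res k hk
    have hkY : k < Y.toNat := by
      have := List.mem_range.mp hk
      omega
    simp only [zero_add]
    rw [hY, show (k : Int) * (Y.toNat : Int) + (k : Int) = ((k * Y.toNat + k : Nat) : Int) by push_cast; ring,
      Int.toNat_natCast]
    simp
    rw [show (max Y 0).toNat = Y.toNat by omega]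

-- ===== VERDICT (by name: the statement is the Claim_ definition above) =====
theorem create_z_grid_spec : Claim_equal_create_z_grid := by
  intro X Y z _ _
  unfold Spec_create_z_grid
  rw [portA_eq, portB_eq, gA_eq_gBp]
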